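-- pv_equiv track=rewrite | github.com/Yunus0or1/Text-Classification-Python | Wrong_Word_Correction/wg.py | remove_upper_row_letter_for_bottom_row_letter
-- ===== SOURCE A (Python) =====
-- upper_row_KeyBoard = ['q', 'w', 'e', 'r', 't', 'y', 'u', 'i', 'o', 'p']
--
-- bottom_row_KeyBoard = ['z', 'x', 'c', 'v', 'b', 'n', 'm']
--
-- def remove_upper_row_letter_for_bottom_row_letter(word):
--     temp_wrong_word = word[0]
--
--     for i in range(1, len(word)):
--
--         if ((word[i] in upper_row_KeyBoard) and (word[i - 1] in bottom_row_KeyBoard)):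
--             temp_wrong_word = temp_wrong_word + ''
--         else:
--             temp_wrong_word = temp_wrong_word + word[i]
--
--     if (word == temp_wrong_word):
--         temp_wrong_word = ""
--
--     return temp_wrong_word
-- ===== SOURCE B (Python) =====
-- def remove_upper_row_letter_for_bottom_row_letter(word):
--     # Cut-and-join: collect the uncut slices between deletion points, then join.
--     pieces = []
--     start = 0
--     for i in range(1, len(word)):
--         if word[i] in 'qwertyuiop' and word[i - 1] in 'zxcvbnm':
--             pieces.append(word[start:i])
--             start = i + 1
--     pieces.append(word[start:])
--     res = ''.join(pieces)
--     return res if res != word else ""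
-- ===== Notes on version B (the rewrite author's own statement) =====
-- stated objective: faster
-- what changed: Replaced A's per-character stateful accumulation (appending each kept char to a growing string) by a cut-and-join segmentation: the loop records only the cut points, emitting whole uncut slices word[start:i] and advancing a start pointer past each deleted letter, and the result is one final join of those slices (no quadratic string rebuilding).
import Mathlib
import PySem

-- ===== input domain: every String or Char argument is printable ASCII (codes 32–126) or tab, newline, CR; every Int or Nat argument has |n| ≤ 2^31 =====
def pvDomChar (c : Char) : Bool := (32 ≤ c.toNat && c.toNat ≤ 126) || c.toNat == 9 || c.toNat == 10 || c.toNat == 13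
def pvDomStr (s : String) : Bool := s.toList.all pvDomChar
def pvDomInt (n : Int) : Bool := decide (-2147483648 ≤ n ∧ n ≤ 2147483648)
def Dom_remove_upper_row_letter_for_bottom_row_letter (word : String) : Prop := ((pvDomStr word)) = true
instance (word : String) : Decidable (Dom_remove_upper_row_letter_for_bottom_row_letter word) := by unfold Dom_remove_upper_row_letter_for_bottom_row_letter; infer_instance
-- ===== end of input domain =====

-- B replaces A's per-character accumulation by cut-and-join segmentation: record cut points, emit whole uncut slices, join once (objective: faster, measured).
-- ===== PORT A =====
def upper_row_KeyBoard : List Char := ['q', 'w', 'e', 'r', 't', 'y', 'u', 'i', 'o', 'p']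
def bottom_row_KeyBoard : List Char := ['z', 'x', 'c', 'v', 'b', 'n', 'm']

def remove_upper_row_letter_for_bottom_row_letter (word : String) : String :=
  let cs := word.toList
  -- temp_wrong_word = word[0]; word[0] raises IndexError on "" (excluded by Pre_): pyGetD default
  let temp := (PySem.List.pyRange 1 (cs.length : Int) 1).foldl
    (fun acc i =>
      if upper_row_KeyBoard.contains (PySem.List.pyGetD cs i ' ') &&
         bottom_row_KeyBoard.contains (PySem.List.pyGetD cs (i - 1) ' ')
      then acc ++ []
      else acc ++ [PySem.List.pyGetD cs i ' '])
    [PySem.List.pyGetD cs 0 ' ']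
  if cs = temp then "" else String.mk temp

-- ===== PORT B =====
def pvUpperStr : List Char := "qwertyuiop".toList
def pvBottomStr : List Char := "zxcvbnm".toList

def remove_upper_row_letter_for_bottom_row_letter_alt (word : String) : String :=
  let cs := word.toList
  -- pieces = []; start = 0; for i in range(1, len(word)): if cut: pieces.append(word[start:i]); start = i+1
  let st := (PySem.List.pyRange 1 (cs.length : Int) 1).foldl
    (fun (st : List (List Char) × Int) i =>
      if pvUpperStr.contains (PySem.List.pyGetD cs i ' ') &&
         pvBottomStr.contains (PySem.List.pyGetD cs (i - 1) ' ')
      then (st.1 ++ [PySem.List.slice cs (some st.2) (some i)], i + 1)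
      else st)
    ([], 0)
  -- pieces.append(word[start:]); res = ''.join(pieces)
  let res := (st.1 ++ [PySem.List.slice cs (some st.2) none]).flatten
  if res ≠ cs then String.mk res else ""

-- ===== PRECONDITION & SPEC =====
-- Pre_ excludes only the empty string, on which A raises IndexError at word[0].
def Pre_remove_upper_row_letter_for_bottom_row_letter (word : String) : Prop := word.toList ≠ []
instance (word : String) : Decidable (Pre_remove_upper_row_letter_for_bottom_row_letter word) := by
  unfold Pre_remove_upper_row_letter_for_bottom_row_letter; infer_instance
def pvWitness_remove_upper_row_letter_for_bottom_row_letter : String := "nice"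
def Spec_remove_upper_row_letter_for_bottom_row_letter (word : String) (out : String) : Prop := out = remove_upper_row_letter_for_bottom_row_letter_alt word
instance (word : String) (out : String) : Decidable (Spec_remove_upper_row_letter_for_bottom_row_letter word out) := by unfold Spec_remove_upper_row_letter_for_bottom_row_letter; infer_instance

-- ===== CLAIM (what is proved, stated in full; the proofs are below) =====
def Claim_equal_remove_upper_row_letter_for_bottom_row_letter : Prop := ∀ (word : String), Dom_remove_upper_row_letter_for_bottom_row_letter word → Pre_remove_upper_row_letter_for_bottom_row_letter word → Spec_remove_upper_row_letter_for_bottom_row_letter word (remove_upper_row_letter_for_bottom_row_letter word)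

-- ===== LEMMAS AND PROOFS =====

-- A's loop from index j+1 on equals the filtered pairs of the corresponding suffix.
lemma pvLoopA (cs : List Char) (j : Nat) (acc : List Char) :
    (PySem.List.pyRange ((j : Int) + 1) (cs.length : Int) 1).foldl
      (fun acc i =>
        if upper_row_KeyBoard.contains (PySem.List.pyGetD cs i ' ') &&
           bottom_row_KeyBoard.contains (PySem.List.pyGetD cs (i - 1) ' ')
        then acc ++ []
        else acc ++ [PySem.List.pyGetD cs i ' ']) acc
    = acc ++ (((cs.drop j).zip (cs.drop (j + 1))).filter
        (fun pc => !(pvUpperStr.contains pc.2) || !(pvBottomStr.contains pc.1))).map Prod.snd := by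
  induction h : cs.length - j generalizing j acc with
  | zero =>
    have hj : cs.length ≤ j := by omega
    rw [PySem.List.pyRange_one_eq_nil (by exact_mod_cast Nat.le_succ_of_le hj)]
    simp [List.drop_eq_nil_of_le hj]
  | succ n ih =>
    have hj : j < cs.length := by omega
    by_cases hj1 : j + 1 < cs.length
    · rw [PySem.List.pyRange_one_cons (by exact_mod_cast hj1), List.foldl_cons]
      have e1 : PySem.List.pyGetD cs ((j : Int) + 1) ' ' = cs[j + 1] := by
        have e : ((j : Int) + 1) = ((j + 1 : Nat) : Int) := by push_cast; ring
        rw [e, PySem.List.pyGetD_natCast]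
        simp [List.getD_eq_getElem?_getD, List.getElem?_eq_getElem hj1]
      have e0 : PySem.List.pyGetD cs ((j : Int) + 1 - 1) ' ' = cs[j] := by
        have e : ((j : Int) + 1 - 1) = ((j : Nat) : Int) := by ring
        rw [e, PySem.List.pyGetD_natCast]
        simp [List.getD_eq_getElem?_getD, List.getElem?_eq_getElem hj]
      rw [e1, e0]
      have hc2 : ((j : Int) + 1 + 1) = ((j + 1 : Nat) : Int) + 1 := by push_cast; ring
      rw [hc2, ih (j + 1) _ (by omega)]
      rw [List.drop_eq_getElem_cons hj, List.drop_eq_getElem_cons hj1, List.zip_cons_cons,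
          List.filter_cons]
      have hU : pvUpperStr = upper_row_KeyBoard := by decide
      have hB : pvBottomStr = bottom_row_KeyBoard := by decide
      rw [hU, hB]
      by_cases hcond :
          (upper_row_KeyBoard.contains cs[j + 1] && bottom_row_KeyBoard.contains cs[j]) = true
      · have hp : (!upper_row_KeyBoard.contains cs[j + 1] ||
            !bottom_row_KeyBoard.contains cs[j]) = false := by simp_all
        simp_all
      · have hc' : (upper_row_KeyBoard.contains cs[j + 1] &&
            bottom_row_KeyBoard.contains cs[j]) = false := Bool.eq_false_iff.mpr hcond
        have hp : (!upper_row_KeyBoard.contains cs[j + 1] ||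
            !bottom_row_KeyBoard.contains cs[j]) = true := by
          rw [← Bool.not_and, hc']; rfl
        simp_all
        rw [if_neg (by tauto)]
        simp [List.append_assoc]
    · rw [PySem.List.pyRange_one_eq_nil (by exact_mod_cast (by omega : cs.length ≤ j + 1))]
      simp [List.drop_eq_nil_of_le (by omega : cs.length ≤ j + 1)]

-- B's segmentation loop invariant: from position j with pending slice starting at s,
-- the flattened pieces plus the final tail slice equal the already-committed output
-- plus the pending slice plus the filtered pairs of the suffix.
lemma pvLoopB (cs : List Char) (j s : Nat) (ps : List (List Char))
    (hs : s ≤ j) (h1 : 1 ≤ j) :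
    (fun (r : List (List Char) × Int) => (r.1 ++ [PySem.List.slice cs (some r.2) none]).flatten)
      ((PySem.List.pyRange (j : Int) (cs.length : Int) 1).foldl
        (fun (st : List (List Char) × Int) i =>
          if pvUpperStr.contains (PySem.List.pyGetD cs i ' ') &&
             pvBottomStr.contains (PySem.List.pyGetD cs (i - 1) ' ')
          then (st.1 ++ [PySem.List.slice cs (some st.2) (some i)], i + 1)
          else st) (ps, (s : Int)))
    = ps.flatten ++ PySem.List.slice cs (some (s : Int)) (some (j : Int)) ++
      (((cs.drop (j - 1)).zip (cs.drop j)).filter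
        (fun pc => !(pvUpperStr.contains pc.2) || !(pvBottomStr.contains pc.1))).map Prod.snd := by
  induction h : cs.length - j generalizing j s ps with
  | zero =>
    have hj : cs.length ≤ j := by omega
    rw [PySem.List.pyRange_one_eq_nil (by exact_mod_cast hj)]
    simp only [List.foldl_nil]
    rw [PySem.List.slice_from_natCast, PySem.List.slice_natCast]
    have htake : (cs.drop s).take (j - s) = cs.drop s :=
      List.take_of_length_le (by simp [List.length_drop]; omega)
    simp [List.drop_eq_nil_of_le hj, List.zip_nil_right, List.flatten_append, htake]
  | succ n ih =>
    have hj : j < cs.length := by omega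
    rw [PySem.List.pyRange_one_cons (by exact_mod_cast hj), List.foldl_cons]
    have ej : PySem.List.pyGetD cs ((j : Nat) : Int) ' ' = cs[j] := by
      rw [PySem.List.pyGetD_natCast]
      simp [List.getD_eq_getElem?_getD, List.getElem?_eq_getElem hj]
    have ej1 : PySem.List.pyGetD cs ((j : Int) - 1) ' ' = cs[j - 1]'(by omega) := by
      have e : ((j : Int) - 1) = ((j - 1 : Nat) : Int) := by omega
      rw [e, PySem.List.pyGetD_natCast]
      simp [List.getD_eq_getElem?_getD, List.getElem?_eq_getElem (by omega : j - 1 < cs.length)]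
    rw [ej, ej1]
    have hdrop1 : cs.drop (j - 1) = cs[j - 1]'(by omega) :: cs.drop j := by
      have e : j = (j - 1) + 1 := by omega
      rw [List.drop_eq_getElem_cons (by omega : j - 1 < cs.length), ← e]
    have hdrop : cs.drop j = cs[j] :: cs.drop (j + 1) := List.drop_eq_getElem_cons hj
    by_cases hc : (pvUpperStr.contains cs[j] && pvBottomStr.contains (cs[j - 1]'(by omega))) = true
    · rw [if_pos hc]
      have e1 : ((j : Int) + 1) = ((j + 1 : Nat) : Int) := by push_cast; ring
      rw [e1, ih (j + 1) (j + 1) _ (le_refl _) (by omega) (by omega)]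
      simp only [Nat.add_sub_cancel]
      rw [hdrop1, hdrop, List.zip_cons_cons, List.filter_cons]
      have hm : cs[j] ∈ pvUpperStr ∧ cs[j - 1]'(by omega) ∈ pvBottomStr := by
        simpa using hc
      have hsl : PySem.List.slice cs (some ((j : Int) + 1)) (some ((j : Int) + 1)) = [] := by
        rw [e1, PySem.List.slice_natCast]; simp
      simp [hsl, hm.1, hm.2, List.flatten_append, List.append_assoc]
    · rw [if_neg hc]
      have e1 : ((j : Int) + 1) = ((j + 1 : Nat) : Int) := by push_cast; ring
      rw [e1, ih (j + 1) s _ (by omega) (by omega) (by omega)]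
      simp only [Nat.add_sub_cancel]
      rw [hdrop1, hdrop, List.zip_cons_cons, List.filter_cons]
      have hm : ¬(cs[j] ∈ pvUpperStr ∧ cs[j - 1]'(by omega) ∈ pvBottomStr) := by
        simpa using hc
      rw [PySem.List.slice_natCast, PySem.List.slice_natCast]
      have htake : (cs.drop s).take (j + 1 - s) = (cs.drop s).take (j - s) ++ [cs[j]] := by
        have : j + 1 - s = (j - s) + 1 := by omega
        rw [this, List.take_succ]
        congr 1
        have hlt : j - s < (cs.drop s).length := by simp [List.length_drop]; omega
        rw [List.getElem?_eq_getElem hlt]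
        simp only [List.getElem_drop, Option.toList_some]
        congr 2; omega
      rw [htake]
      simp [not_and_or.mp hm, List.append_assoc]

-- ===== VERDICT (by name: the statement is the Claim_ definition above) =====
theorem remove_upper_row_letter_for_bottom_row_letter_spec : Claim_equal_remove_upper_row_letter_for_bottom_row_letter := by
  intro word _ hpre
  unfold Spec_remove_upper_row_letter_for_bottom_row_letter
  unfold remove_upper_row_letter_for_bottom_row_letter remove_upper_row_letter_for_bottom_row_letter_alt
  have hA := pvLoopA word.toList 0 [PySem.List.pyGetD word.toList 0 ' ']
  simp only [Nat.cast_zero, zero_add, List.drop_zero] at hA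
  have hB := pvLoopB word.toList 1 0 [] (by omega) (le_refl 1)
  simp only [Nat.cast_one, Nat.cast_zero, List.flatten_nil, List.nil_append,
    Nat.sub_self, List.drop_zero] at hB
  simp only [hA, hB]
  have hcs : word.toList ≠ [] := hpre
  obtain ⟨c0, cs', hsplit⟩ := List.exists_cons_of_ne_nil hcs
  have h01 : PySem.List.slice word.toList (some 0) (some 1) = [c0] := by
    have := PySem.List.slice_natCast (xs := word.toList) (a := 0) (b := 1)
    simp only [Nat.cast_zero, Nat.cast_one] at this
    rw [this, hsplit]; rfl
  have hg0 : PySem.List.pyGetD word.toList 0 ' ' = c0 := by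
    rw [hsplit, PySem.List.pyGetD_zero_cons]
  rw [h01, hg0]
  simp only [List.singleton_append, List.drop_one]
  set F := (((word.toList).zip (word.toList.tail)).filter
      (fun pc => !(pvUpperStr.contains pc.2) || !(pvBottomStr.contains pc.1))).map Prod.snd
  by_cases hcseq : word.toList = c0 :: F
  · simp [hcseq]
  · have h2 : c0 :: F ≠ word.toList := fun h => hcseq h.symm
    simp [hcseq, h2]
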